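-- pv_equiv track=rewrite | github.com/ssshhhiiissshhh/bioinformatics | functions.py | remove_gapped_columns
-- ===== SOURCE A (Python) =====
-- def remove_gapped_columns(aligned_sequences):
--     """
--     Удаляет все колонки, где есть хотя бы один '-'
--     Возвращает очищенные последовательности (без гэпов вообще)
--     """
--     if not aligned_sequences:
--         return []
--
--     length = len(aligned_sequences[0])
--     n = len(aligned_sequences)
--
--     cleaned = [""] * n
--
--     for col in range(length):
--         column = [aligned_sequences[i][col] for i in range(n)]
--         if '-' not in column:  # только если ни одного гэпа
--             for i in range(n):
--                 cleaned[i] += column[i]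
--
--     return cleaned
-- ===== SOURCE B (Python) =====
-- def remove_gapped_columns(aligned_sequences):
--     if not aligned_sequences:
--         return []
--     length = len(aligned_sequences[0])
--     n = len(aligned_sequences)
--     keep = [c for c in range(length)
--             if all(aligned_sequences[i][c] != '-' for i in range(n))]
--     return [''.join(seq[c] for c in keep) for seq in aligned_sequences]
-- ===== Notes on version B (the rewrite author's own statement) =====
-- stated objective: idiomatic
-- what changed: B first computes the list of gap-free column indices, then assembles each row with one join, instead of A's column-major accumulation that appends one character to every growing row string per kept column.
import Mathlib
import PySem

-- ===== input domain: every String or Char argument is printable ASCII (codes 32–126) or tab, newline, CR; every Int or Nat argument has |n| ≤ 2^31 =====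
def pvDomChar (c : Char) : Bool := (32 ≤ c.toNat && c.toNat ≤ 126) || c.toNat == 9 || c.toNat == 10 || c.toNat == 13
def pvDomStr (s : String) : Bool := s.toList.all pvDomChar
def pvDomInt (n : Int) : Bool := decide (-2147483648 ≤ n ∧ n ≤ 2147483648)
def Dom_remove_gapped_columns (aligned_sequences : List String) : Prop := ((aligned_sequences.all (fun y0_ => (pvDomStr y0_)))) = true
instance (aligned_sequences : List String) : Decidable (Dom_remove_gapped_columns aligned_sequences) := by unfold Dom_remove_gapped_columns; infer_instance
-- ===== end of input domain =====

-- B separates the gap-free-column selection from row assembly (one pass computing `keep`,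
-- then one join per row) instead of A's column-major accumulation; objective: idiomatic.


-- ===== PORT A =====
-- Indexing `aligned_sequences[i][col]` is ported as `getD … ' '`; this is exact whenever the
-- index is in range, which Pre_ (no row shorter than the first) guarantees for every access A makes.
def remove_gapped_columns (aligned_sequences : List String) : List String :=
  if aligned_sequences = [] then []
  else
    let rows := aligned_sequences.map String.toList
    let length := (rows.headD []).length
    let n := rows.length
    let init : List (List Char) := List.replicate n []
    -- for col in range(length): build the column; if '-' not in column, append column[i] to cleaned[i]
    let cleaned := (List.range length).foldl (fun cleaned col =>
      let column := (List.range n).map (fun i => (rows.getD i []).getD col ' ')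
      if '-' ∈ column then cleaned
      else cleaned.mapIdx (fun i r => r ++ [column.getD i ' '])) init
    cleaned.map (fun r => String.mk r)

-- ===== PORT B =====
def remove_gapped_columns_alt (aligned_sequences : List String) : List String :=
  if aligned_sequences = [] then []
  else
    let rows := aligned_sequences.map String.toList
    let length := (rows.headD []).length
    let n := rows.length
    -- keep = [c for c in range(length) if all(rows[i][c] != '-' for i in range(n))]
    let keep := (List.range length).filter (fun c =>
      (List.range n).all (fun i => (rows.getD i []).getD c ' ' ≠ '-'))
    rows.map (fun r => String.mk (keep.map (fun c => r.getD c ' ')))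

-- ===== PRECONDITION & SPEC =====
-- Pre_ excludes ragged inputs where some row is shorter than the first row: there the Python A
-- raises IndexError while building a column, so A returns no value to match.
def Pre_remove_gapped_columns (aligned_sequences : List String) : Prop :=
  ∀ s ∈ aligned_sequences, (aligned_sequences.headD "").toList.length ≤ s.toList.length
instance (aligned_sequences : List String) : Decidable (Pre_remove_gapped_columns aligned_sequences) := by unfold Pre_remove_gapped_columns; infer_instance
def pvWitness_remove_gapped_columns : List String := ["AB-", "A-C", "XYZ"]
def Spec_remove_gapped_columns (aligned_sequences : List String) (out : List String) : Prop := out = remove_gapped_columns_alt aligned_sequences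
instance (aligned_sequences : List String) (out : List String) : Decidable (Spec_remove_gapped_columns aligned_sequences out) := by unfold Spec_remove_gapped_columns; infer_instance

-- ===== CLAIM (what is proved, stated in full; the proofs are below) =====
def Claim_equal_remove_gapped_columns : Prop := ∀ (aligned_sequences : List String), Dom_remove_gapped_columns aligned_sequences → Pre_remove_gapped_columns aligned_sequences → Spec_remove_gapped_columns aligned_sequences (remove_gapped_columns aligned_sequences)

-- ===== LEMMAS AND PROOFS =====

-- A's fold over column indices, characterised: starting from `acc` of length n, it appends to row i
-- exactly the characters of the kept columns of `cols`.
theorem foldA_inv (f : Nat → Nat → Char) (n : Nat) (cols : List Nat)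
    (acc : List (List Char)) (hacc : acc.length = n) :
    cols.foldl (fun cleaned col =>
      let column := (List.range n).map (fun i => f i col)
      if '-' ∈ column then cleaned
      else cleaned.mapIdx (fun i r => r ++ [column.getD i ' '])) acc
    = acc.mapIdx (fun i r =>
        r ++ (cols.filter (fun c => ¬ '-' ∈ (List.range n).map (fun i => f i c))).map (f i)) := by
  induction cols generalizing acc with
  | nil =>
    apply List.ext_getElem (by simp)
    intro i h1 h2
    simp
  | cons c cs ih =>
    rw [List.foldl_cons]
    by_cases h : '-' ∈ (List.range n).map (fun i => f i c)
    · rw [if_pos h, ih acc hacc]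
      have hd : decide ('-' ∈ (List.range n).map (fun i => f i c)) = true := by simpa using h
      simp only [List.filter_cons, decide_not, hd, Bool.not_true, Bool.false_eq_true, if_neg,
        not_false_iff]
    · rw [if_neg h, ih _ (by simp [hacc]), List.mapIdx_mapIdx]
      have hd : decide ('-' ∈ (List.range n).map (fun i => f i c)) = false := by simpa using h
      simp only [List.filter_cons, decide_not, hd, Bool.not_false, if_pos]
      apply List.ext_getElem (by simp)
      intro i h1 h2
      simp only [List.getElem_mapIdx, Function.comp]
      have hi : i < n := by simpa [hacc] using h1
      rw [List.getD_eq_getElem _ _ (by simpa using hi)]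
      simp [List.map_cons, List.append_assoc]

theorem remove_gapped_columns_spec : Claim_equal_remove_gapped_columns := by
  intro xs _ _
  unfold Spec_remove_gapped_columns remove_gapped_columns remove_gapped_columns_alt
  by_cases hxs : xs = []
  · simp [hxs]
  · simp only [hxs, if_neg, not_false_iff]
    set rows := xs.map String.toList with hrows
    set L := (rows.headD []).length
    set n := rows.length with hn
    rw [foldA_inv (fun i c => (rows.getD i []).getD c ' ') n (List.range L)
          (List.replicate n []) (by exact List.length_replicate)]
    -- the two filter predicates agree: '-' ∉ column ↔ all entries ≠ '-'
    have hfilter : ((List.range L).filter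
        (fun c => ¬ '-' ∈ (List.range n).map (fun i => (rows.getD i []).getD c ' ')))
      = ((List.range L).filter
        (fun c => (List.range n).all (fun i => (rows.getD i []).getD c ' ' ≠ '-'))) := by
      apply List.filter_congr
      intro c _
      rw [Bool.eq_iff_iff]
      simp
    rw [hfilter]
    apply List.ext_getElem (by simpa using hn)
    intro i h1 h2
    simp only [List.getElem_map, List.getElem_mapIdx, List.getElem_replicate, List.nil_append]
    congr 1
    apply List.map_congr_left
    intro c _
    rw [List.getD_eq_getElem rows _ (by simpa using h2)]

-- ===== VERDICT (by name: the statement is the Claim_ definition above) =====
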